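-- pv_equiv track=rewrite | github.com/navik86/homeworks_for_trainee | homework_1.py | bananas
-- ===== SOURCE A (Python) =====
-- from itertools import combinations
--
-- def bananas(s) -> set:
--     result = set()
--     word = 'banana'
--
--     # create index and letter pairs
--     couples = enumerate(s)
--
--     # create combinations
--     list_combinations = combinations(couples, 6)
--
--     # compare word and combination
--     for i in list_combinations:
--         result_word = ['-' for i in range(len(s))]
--         temporary_word = ''.join(j[1] for j in i)
--
--         if temporary_word == word:
--             for y in i:
--                 result_word[y[0]] = y[1]
--             result.add(''.join(result_word))
--
--     return result
-- ===== SOURCE B (Python) =====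
-- def bananas(s) -> set:
--     word = 'banana'
--     pairs = list(enumerate(s))
--
--     def go(wi, k):
--         # all increasing (index, char) tuples in pairs[k:] spelling word[wi:]
--         if wi == len(word):
--             return [[]]
--         res = []
--         for j in range(k, len(pairs)):
--             ix, ch = pairs[j]
--             if ch == word[wi]:
--                 for rest in go(wi + 1, j + 1):
--                     res.append([(ix, ch)] + rest)
--         return res
--
--     result = set()
--     for t in go(0, 0):
--         mask = ['-'] * len(s)
--         for ix, ch in t:
--             mask[ix] = ch
--         result.add(''.join(mask))
--     return result
-- ===== Notes on version B (the rewrite author's own statement) =====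
-- stated objective: faster
-- what changed: Replace the exhaustive scan of all C(n,6) index combinations with a letter-guided recursive search that only extends index tuples whose characters already match a prefix of the target word.
import Mathlib
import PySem

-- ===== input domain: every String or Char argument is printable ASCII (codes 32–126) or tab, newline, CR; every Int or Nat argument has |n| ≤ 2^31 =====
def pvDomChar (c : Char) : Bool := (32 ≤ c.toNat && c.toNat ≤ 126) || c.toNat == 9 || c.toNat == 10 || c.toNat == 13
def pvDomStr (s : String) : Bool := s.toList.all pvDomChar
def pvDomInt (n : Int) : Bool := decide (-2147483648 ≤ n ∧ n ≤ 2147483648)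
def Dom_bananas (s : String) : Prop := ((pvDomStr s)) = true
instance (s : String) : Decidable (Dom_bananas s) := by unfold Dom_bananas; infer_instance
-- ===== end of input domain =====

-- B replaces A's scan of all C(n,6) six-element combinations with a letter-guided
-- recursive search that only builds index tuples already matching a prefix of "banana" (faster).

-- ===== PORT A =====
def bananas (s : String) : List String :=
  let word : List Char := "banana".toList
  let couples := PySem.List.enumerate s.toList 0
  (PySem.List.combinations couples 6).foldl
    (fun (result : List String) (i : List (Int × Char)) =>
      let result_word := (List.range s.toList.length).map (fun _ => '-')
      let temporary_word : List Char := i.map (fun y => y.2)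
      if temporary_word = word then
        PySem.Set.add result
          (String.ofList (i.foldl (fun acc y => PySem.List.pySetD acc y.1 y.2) result_word))
      else result)
    []

-- ===== PORT B =====
-- B's inner `go`: walk the remaining (index, char) pairs; whenever the char equals the
-- current target letter, recurse for the rest of the word on the later pairs.
def bananasGo (w : List Char) (ps : List (Int × Char)) : List (List (Int × Char)) :=
  match w, ps with
  | [], _ => [[]]
  | _ :: _, [] => []
  | wh :: wt, p :: rest =>
      (if p.2 = wh then (bananasGo wt rest).map (p :: ·) else []) ++ bananasGo (wh :: wt) rest

def bananas_alt (s : String) : List String :=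
  let word : List Char := "banana".toList
  let pairs := PySem.List.enumerate s.toList 0
  (bananasGo word pairs).foldl
    (fun result t =>
      PySem.Set.add result
        (String.ofList (t.foldl (fun acc y => PySem.List.pySetD acc y.1 y.2)
          (List.replicate s.toList.length '-'))))
    []

-- ===== PRECONDITION & SPEC =====
def Spec_bananas (s : String) (out : List String) : Prop := out = bananas_alt s
instance (s : String) (out : List String) : Decidable (Spec_bananas s out) := by unfold Spec_bananas; infer_instance

-- ===== CLAIM (what is proved, stated in full; the proofs are below) =====
def Claim_equal_bananas : Prop := ∀ (s : String), Dom_bananas s → Spec_bananas s (bananas s)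

-- ===== LEMMAS AND PROOFS =====

-- A's filtered list of 6-combinations is exactly B's letter-guided search result.
theorem filter_combinations_eq_go (w : List Char) (ps : List (Int × Char)) :
    (PySem.List.combinations ps w.length).filter (fun c => List.map (fun y => y.2) c = w)
      = bananasGo w ps := by
  induction ps generalizing w with
  | nil =>
    cases w with
    | nil => simp [PySem.List.combinations_zero, bananasGo]
    | cons wh wt => simp [PySem.List.combinations_nil_succ, bananasGo]
  | cons p rest ih =>
    cases w with
    | nil => simp [PySem.List.combinations_zero, bananasGo]
    | cons wh wt =>
      have e1 := ih (wh :: wt)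
      have e2 := ih wt
      rw [show (wh :: wt).length = wt.length + 1 from rfl] at e1 ⊢
      rw [PySem.List.combinations_cons_succ, List.filter_append, List.filter_map, e1]
      show _ ++ _ = (if p.2 = wh then (bananasGo wt rest).map (p :: ·) else []) ++ bananasGo (wh :: wt) rest
      congr 1
      by_cases h : p.2 = wh
      · rw [if_pos h, ← e2]
        exact congrArg (List.map (p :: ·))
          (List.filter_congr (fun c _ => by simp [h]))
      · rw [if_neg h]
        simp [Function.comp_def, h]

-- ===== VERDICT (by name: the statement is the Claim_ definition above) =====
theorem bananas_spec : Claim_equal_bananas := by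
  intro s _
  unfold Spec_bananas bananas bananas_alt
  simp only []
  have hf := List.foldl_filter
    (f := fun (result : List String) (i : List (Int × Char)) =>
      PySem.Set.add result
        (String.ofList (i.foldl (fun acc y => PySem.List.pySetD acc y.1 y.2)
          ((List.range s.toList.length).map (fun _ => '-')))))
    (p := fun c : List (Int × Char) => decide (List.map (fun y => y.2) c = "banana".toList))
    (l := PySem.List.combinations (PySem.List.enumerate s.toList 0) 6)
    (init := ([] : List String))
  simp only [decide_eq_true_eq] at hf
  rw [← hf]
  rw [show (6 : Nat) = ("banana".toList).length from rfl,
    filter_combinations_eq_go "banana".toList (PySem.List.enumerate s.toList 0)]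
  simp [List.map_const']
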